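-- pv_equiv track=rewrite | github.com/CindeaBenedict/gdg-hack-thing | clausematch-backend/services/api/app/pipeline/align.py | anchor_align
-- ===== SOURCE A (Python) =====
-- from typing import Iterable, List, Tuple
--
-- def anchor_align(en: Iterable[str], de: Iterable[str]) -> List[Tuple[str, str, str]]:
--     # index-wise pairing with a simple key
--     en_list, de_list = list(en), list(de)
--     m = max(len(en_list), len(de_list))
--     out: List[Tuple[str, str, str]] = []
--     for i in range(m):
--         a = en_list[i] if i < len(en_list) else ""
--         b = de_list[i] if i < len(de_list) else ""
--         out.append((f"clause_{i}", a, b))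
--     return out
-- ===== SOURCE B (Python) =====
-- from typing import Iterable, List, Tuple
--
-- def anchor_align(en: Iterable[str], de: Iterable[str]) -> List[Tuple[str, str, str]]:
--     # staged construction: common zipped prefix, then the leftover tail of the
--     # longer list (only one of the two extensions is non-empty), then keys
--     en_list, de_list = list(en), list(de)
--     n = min(len(en_list), len(de_list))
--     paired = list(zip(en_list, de_list))
--     paired += [(a, "") for a in en_list[n:]]
--     paired += [("", b) for b in de_list[n:]]
--     return [(f"clause_{i}", a, b) for i, (a, b) in enumerate(paired)]
-- ===== Notes on version B (the rewrite author's own statement) =====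
-- stated objective: alternative
-- what changed: Replaces A's single index loop over range(max(len,len)) with per-index bounds-check branches by a staged construction: zip to the common prefix, extend with the leftover slice of whichever list is longer, then attach keys via enumerate in a final pass.
import Mathlib
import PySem

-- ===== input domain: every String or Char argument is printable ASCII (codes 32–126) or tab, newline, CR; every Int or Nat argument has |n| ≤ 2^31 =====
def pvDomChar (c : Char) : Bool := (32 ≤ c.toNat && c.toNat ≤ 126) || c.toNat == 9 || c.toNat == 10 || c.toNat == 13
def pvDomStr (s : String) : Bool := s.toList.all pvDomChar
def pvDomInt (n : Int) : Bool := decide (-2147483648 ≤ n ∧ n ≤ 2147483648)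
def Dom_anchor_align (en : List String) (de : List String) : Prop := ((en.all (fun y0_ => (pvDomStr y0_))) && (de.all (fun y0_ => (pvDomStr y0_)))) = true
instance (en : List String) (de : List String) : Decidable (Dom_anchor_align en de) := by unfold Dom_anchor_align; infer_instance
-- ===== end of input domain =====

-- B builds the pair list in stages (zip of the common prefix, then the leftover tail
-- of the longer list) and keys it in a final pass, instead of A's index loop with
-- per-index bounds checks (alternative decomposition; return value only).

-- ===== PORT A =====
-- index loop over range(max(len(en), len(de))) with bounds-checked access, appending to out
def anchor_align (en : List String) (de : List String) : List (String × String × String) :=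
  let m : Int := max (en.length : Int) (de.length : Int)
  (PySem.List.pyRange 0 m 1).foldl (fun out i =>
    let a := if i < (en.length : Int) then PySem.List.pyGetD en i "" else ""
    let b := if i < (de.length : Int) then PySem.List.pyGetD de i "" else ""
    out ++ [(String.append "clause_" (PySem.Int.toStr i), a, b)]) []

-- ===== PORT B =====
-- zip(en, de) stops at the shorter list; en_list[n:] / de_list[n:] are drops (n = min)
def anchor_align_alt (en : List String) (de : List String) : List (String × String × String) :=
  let n := min en.length de.length
  let paired := en.zip de
    ++ (en.drop n).map (fun a => (a, ""))
    ++ (de.drop n).map (fun b => ("", b))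
  (PySem.List.enumerate paired).map
    (fun p => (String.append "clause_" (PySem.Int.toStr p.1), p.2.1, p.2.2))

-- ===== PRECONDITION & SPEC =====
def Spec_anchor_align (en : List String) (de : List String) (out : List (String × String × String)) : Prop := out = anchor_align_alt en de
instance (en : List String) (de : List String) (out : List (String × String × String)) : Decidable (Spec_anchor_align en de out) := by unfold Spec_anchor_align; infer_instance

-- ===== CLAIM (what is proved, stated in full; the proofs are below) =====
def Claim_equal_anchor_align : Prop := ∀ (en : List String) (de : List String), Dom_anchor_align en de → Spec_anchor_align en de (anchor_align en de)

-- ===== LEMMAS AND PROOFS =====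

-- index-wise characterisation of B's staged pair list, by parallel induction
lemma paired_eq (en de : List String) :
    en.zip de
      ++ (en.drop (min en.length de.length)).map (fun a => (a, ""))
      ++ (de.drop (min en.length de.length)).map (fun b => ("", b)) =
    (List.range (max en.length de.length)).map
      (fun (k : Nat) => (en.getD k "", de.getD k "")) := by
  induction en generalizing de with
  | nil =>
    induction de with
    | nil => simp
    | cons b bs ih =>
      simp only [List.zip_nil_left, List.drop_nil, List.map_nil, List.nil_append,
        List.length_nil, List.length_cons, Nat.min_eq_left (Nat.zero_le _),
        Nat.max_eq_right (Nat.zero_le _), List.drop_zero, List.map_cons,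
        List.range_succ_eq_map, List.map_map] at ih ⊢
      refine congrArg₂ List.cons (by simp) ?_
      rw [ih]
      apply List.map_congr_left
      intro k _
      simp [Function.comp]
  | cons a as ih =>
    cases de with
    | nil =>
      simp only [List.zip_nil_right, List.drop_nil, List.map_nil, List.append_nil,
        List.length_nil, List.length_cons, Nat.min_eq_right (Nat.zero_le _),
        Nat.max_eq_left (Nat.zero_le _), List.drop_zero, List.map_cons,
        List.nil_append, List.range_succ_eq_map, List.map_map]
      have ih0 := ih []
      simp only [List.zip_nil_right, List.drop_nil, List.map_nil, List.append_nil,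
        List.length_nil, Nat.min_eq_right (Nat.zero_le _),
        Nat.max_eq_left (Nat.zero_le _), List.drop_zero, List.nil_append] at ih0
      refine congrArg₂ List.cons (by simp) ?_
      rw [ih0]
      apply List.map_congr_left
      intro k _
      simp [Function.comp]
    | cons b bs =>
      simp only [List.zip_cons_cons, List.length_cons, Nat.succ_min_succ,
        Nat.succ_max_succ, List.drop_succ_cons, List.cons_append,
        List.range_succ_eq_map, List.map_cons, List.map_map]
      refine congrArg₂ List.cons (by simp) ?_
      rw [ih bs]
      apply List.map_congr_left
      intro k _
      simp [Function.comp]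

-- A as a map over List.range
lemma anchor_align_eq_map (en de : List String) :
    anchor_align en de =
      (List.range (max en.length de.length)).map
        (fun (k : Nat) => (String.append "clause_" (PySem.Int.toStr (k : Int)),
                   en.getD k "", de.getD k "")) := by
  unfold anchor_align
  rw [PySem.List.foldl_append_singleton_eq_map]
  have hm : (max (en.length : Int) (de.length : Int) - 0).toNat = max en.length de.length := by
    omega
  rw [PySem.List.pyRange_one, hm, List.map_map]
  simp only [List.nil_append]
  apply List.map_congr_left
  intro k hk
  rw [List.mem_range] at hk
  simp only [Function.comp, zero_add, Prod.mk.injEq]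
  refine ⟨trivial, ?_, ?_⟩
  · by_cases h : k < en.length
    · rw [if_pos (by exact_mod_cast h), PySem.List.pyGetD_natCast]
    · rw [if_neg (by exact_mod_cast h), List.getD_eq_default _ _ (by omega)]
  · by_cases h : k < de.length
    · rw [if_pos (by exact_mod_cast h), PySem.List.pyGetD_natCast]
    · rw [if_neg (by exact_mod_cast h), List.getD_eq_default _ _ (by omega)]

-- enumerate of a range-map keyed list
lemma enum_range_map {α : Type} (M : Nat) (f : Nat → α) (s : Int) :
    PySem.List.enumerate ((List.range M).map f) s =
      (List.range M).map (fun (k : Nat) => (s + (k : Int), f k)) := by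
  induction M generalizing f s with
  | zero => simp
  | succ m ih =>
    rw [List.range_succ_eq_map]
    simp only [List.map_cons, PySem.List.enumerate_cons, List.map_map]
    rw [ih]
    refine congrArg₂ List.cons (by simp) ?_
    apply List.map_congr_left
    intro k _
    simp [Function.comp]
    ring

-- ===== VERDICT (by name: the statement is the Claim_ definition above) =====
theorem anchor_align_spec : Claim_equal_anchor_align := by
  intro en de _
  unfold Spec_anchor_align anchor_align_alt
  dsimp only
  rw [paired_eq, enum_range_map, anchor_align_eq_map, List.map_map]
  apply List.map_congr_left
  intro k _
  simp [Function.comp]
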